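-- pv_equiv track=rewrite | github.com/swjw13/baekjoon | programmers/kakao/17687.py | solution
-- ===== SOURCE A (Python) =====
-- def solution(n, t, m, p):
--     answer = ''
--
--     change = {10: "A", 11: "B", 12: "C", 13: "D", 14: "E", 15: "F"}
--     for i in range(10):
--         change[i] = i
--
--     def decChange(num):
--         changed = ""
--         while num != 0:
--             changed = str(change[num % n]) + changed
--             num //= n
--         return changed
--
--     all = "0"
--     for i in range(1, t * m):
--         all += decChange(i)
--
--     for i in range(t):
--         answer += all[p + m * i - 1]
--
--     return answer
-- ===== SOURCE B (Python) =====
-- def solution(n, t, m, p):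
--     SYM = "0123456789ABCDEF"
--
--     def rep(j):
--         if j == 0:
--             return "0"
--         s = []
--         while j != 0:
--             s.append(SYM[j % n])
--             j //= n
--         return ''.join(reversed(s))
--
--     out = []
--     j = 0          # current number in the virtual stream '0' + rep(1) + rep(2) + ...
--     pos = 0        # index of the first character of rep(j) in that stream
--     cur = rep(0)
--     for i in range(t):
--         idx = p - 1 + m * i
--         while pos + len(cur) <= idx:
--             pos += len(cur)
--             j += 1
--             cur = rep(j)
--         out.append(cur[idx - pos])
--     return ''.join(out)
-- ===== Notes on version B (the rewrite author's own statement) =====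
-- stated objective: alternative
-- what changed: Instead of materialising the whole concatenated base-n string '0'+rep(1)+... and indexing it, B walks the virtual stream once with a running (number, offset) pointer, converting each number with a '0123456789ABCDEF' symbol table (no dict), and picks the t requested digits during the single forward scan.
-- outside the precondition, e.g. on solution(2, 1, 3, -1): A returns '1', B raises IndexError; on solution(4, 2, 1, 0): A returns '10', B returns '00'
import Mathlib
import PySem

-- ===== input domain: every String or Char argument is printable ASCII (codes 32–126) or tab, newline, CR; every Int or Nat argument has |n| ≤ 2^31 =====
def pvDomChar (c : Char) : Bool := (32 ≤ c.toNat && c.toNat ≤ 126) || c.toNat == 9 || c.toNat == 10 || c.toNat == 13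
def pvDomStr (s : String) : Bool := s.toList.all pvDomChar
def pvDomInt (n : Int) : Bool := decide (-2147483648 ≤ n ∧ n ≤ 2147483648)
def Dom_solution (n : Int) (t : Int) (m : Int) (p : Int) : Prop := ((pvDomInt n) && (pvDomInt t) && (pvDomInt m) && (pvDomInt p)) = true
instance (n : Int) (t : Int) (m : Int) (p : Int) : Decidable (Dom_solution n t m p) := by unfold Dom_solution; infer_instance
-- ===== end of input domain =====

-- B replaces A's materialised concatenation of all base-n numbers by a single forward scan
-- with a running (number, offset) pointer into the same virtual digit stream (objective: alternative).

-- ===== PORT A =====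

-- str(change[d]): the dict stores ints for keys 0..9 and strings "A".."F" for 10..15
def pvStrOf : Sum Int String → List Char
  | .inl k => PySem.Int.toChars k
  | .inr s => s.toList

-- change = {10:"A", …, 15:"F"}; for i in range(10): change[i] = i
def pvChange : PySem.Dict Int (Sum Int String) :=
  (PySem.List.pyRange 0 10 1).foldl (fun d i => d.insert i (.inl i))
    (PySem.Dict.ofList [(10, .inr "A"), (11, .inr "B"), (12, .inr "C"),
                        (13, .inr "D"), (14, .inr "E"), (15, .inr "F")])

-- while num != 0: changed = str(change[num % n]) + changed; num //= n   (fuel = |num|+1 suffices on Pre_)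
def pvDecGo (n : Int) : Nat → Int → List Char → List Char
  | 0, _, changed => changed
  | f+1, num, changed =>
      if num = 0 then changed
      else pvDecGo n f (PySem.Int.floordiv num n)
             (pvStrOf (pvChange.getD (PySem.Int.mod num n) (.inl 0)) ++ changed)

def pvDecChange (n : Int) (num : Int) : List Char := pvDecGo n (num.natAbs + 1) num []

def solution (n : Int) (t : Int) (m : Int) (p : Int) : String :=
  let all := (PySem.List.pyRange 1 (t * m) 1).foldl (fun acc i => acc ++ pvDecChange n i) ['0']
  let answer := (PySem.List.pyRange 0 t 1).foldl
      (fun ans i => ans ++ (match PySem.List.pyGet? all (p + m * i - 1) with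
          | some c => [c] | none => [])) []
  String.mk answer

-- ===== PORT B =====

def pvSym : List Char := "0123456789ABCDEF".toList

-- while j != 0: s.append(SYM[j % n]); j //= n
def pvRepGo (n : Int) : Nat → Int → List Char → List Char
  | 0, _, s => s
  | f+1, j, s =>
      if j = 0 then s
      else pvRepGo n f (PySem.Int.floordiv j n) (s ++ [PySem.List.pyGetD pvSym (PySem.Int.mod j n) '?'])

def pvRep (n : Int) (j : Int) : List Char :=
  if j = 0 then ['0'] else (pvRepGo n (j.natAbs + 1) j []).reverse

-- while pos + len(cur) <= idx: pos += len(cur); j += 1; cur = rep(j)   (fuel bounds the scan)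
def pvAdvance (n : Int) (idx : Int) : Nat → Int × Int × List Char → Int × Int × List Char
  | 0, st => st
  | f+1, (j, pos, cur) =>
      if pos + (cur.length : Int) ≤ idx
      then pvAdvance n idx f (j + 1, pos + (cur.length : Int), pvRep n (j + 1))
      else (j, pos, cur)

-- one iteration of B's for-loop: advance the pointer to idx, pick the digit
def pvStepB (n : Int) (m : Int) (p : Int) (st : List Char × Int × Int × List Char) (i : Int) :
    List Char × Int × Int × List Char :=
  let idx := p - 1 + m * i
  let r := pvAdvance n idx ((idx - st.2.2.1).toNat + 1) st.2
  (st.1 ++ (match PySem.List.pyGet? r.2.2 (idx - r.2.1) with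
      | some c => [c] | none => []), r)

def solution_alt (n : Int) (t : Int) (m : Int) (p : Int) : String :=
  String.mk ((PySem.List.pyRange 0 t 1).foldl (pvStepB n m p) ([], 0, 0, pvRep n 0)).1

-- ===== PRECONDITION & SPEC =====

-- length of A's string `all` in closed form: 1 + Σ_{j=1}^{K-1} #digits_n(j)
-- = 1 + Σ_i max(0, K - n^i); the `max n 2` only guards bases < 2, which Pre_ admits
-- solely together with t*m ≤ 1 (where the sum is 0 and the length is 1 anyway)
def pvLen (n : Int) (K : Int) : Int :=
  1 + (Finset.range 63).sum (fun i => max 0 (K - (max n 2) ^ i))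

-- Pre_ is exactly where A returns normally, except that it also excludes the runs touching a
-- NEGATIVE index p-1+m*i (there A reads through Python's negative-index wraparound while B's
-- forward scan raises IndexError on most of them); everywhere else outside Pre_ A raises
-- (KeyError for a digit ≥ 16 or a negative base, ZeroDivisionError for n = 0, IndexError for
-- an index at or past the end of `all`) or never terminates (n = 1 with t*m > 1).
def Pre_solution (n : Int) (t : Int) (m : Int) (p : Int) : Prop :=
  (2 ≤ n ∨ t * m ≤ 1) ∧ (n ≤ 16 ∨ t * m ≤ 16) ∧
  (t ≤ 0 ∨ (1 ≤ p ∧ 0 ≤ p - 1 + m * (t - 1) ∧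
            p - 1 < pvLen n (t * m) ∧ p - 1 + m * (t - 1) < pvLen n (t * m)))
instance (n : Int) (t : Int) (m : Int) (p : Int) : Decidable (Pre_solution n t m p) := by
  unfold Pre_solution; infer_instance

def pvWitness_solution : Int × Int × Int × Int := (2, 4, 2, 1)

def Spec_solution (n : Int) (t : Int) (m : Int) (p : Int) (out : String) : Prop := out = solution_alt n t m p
instance (n : Int) (t : Int) (m : Int) (p : Int) (out : String) : Decidable (Spec_solution n t m p out) := by
  unfold Spec_solution; infer_instance

-- ===== CLAIM (what is proved, stated in full; the proofs are below) =====
def Claim_equal_solution : Prop := ∀ (n : Int) (t : Int) (m : Int) (p : Int), Dom_solution n t m p → Pre_solution n t m p → Spec_solution n t m p (solution n t m p)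

-- ===== LEMMAS AND PROOFS =====

theorem le_or_lt' (a b : Int) : a ≤ b ∨ b < a := by omega

-- the digit list of num, least-significant first, as both loops produce it
def pvDigs (n : Int) : Nat → Int → List Char
  | 0, _ => []
  | f+1, j =>
      if j = 0 then []
      else PySem.List.pyGetD pvSym (PySem.Int.mod j n) '?' :: pvDigs n f (PySem.Int.floordiv j n)

-- the virtual stream '0' + rep(1) + rep(2) + … truncated after k numbers
def pvStream (n : Int) (k : Nat) : List Char :=
  (List.range k).flatMap (fun j => pvRep n (j : Int))

theorem pv_strOf_eq (d : Int) (h0 : 0 ≤ d) (h16 : d < 16) :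
    pvStrOf (pvChange.getD d (.inl 0)) = [PySem.List.pyGetD pvSym d '?'] := by
  interval_cases d <;> decide

theorem pvRepGo_eq_digs (n : Int) : ∀ (f : Nat) (j : Int) (s : List Char),
    pvRepGo n f j s = s ++ (pvDigs n f j) := by
  intro f
  induction f with
  | zero => intro j s; simp [pvRepGo, pvDigs]
  | succ f ih =>
      intro j s
      by_cases hj : j = 0
      · simp [pvRepGo, pvDigs, hj]
      · simp [pvRepGo, pvDigs, hj, ih]

theorem pvDecGo_eq_digs (n : Int) (hn : 2 ≤ n) :
    ∀ (f : Nat) (j : Int) (changed : List Char), 0 ≤ j → (n ≤ 16 ∨ j ≤ 15) →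
    pvDecGo n f j changed = (pvDigs n f j).reverse ++ changed := by
  intro f
  induction f with
  | zero => intro j changed _ _; simp [pvDecGo, pvDigs]
  | succ f ih =>
      intro j changed hj0 hdig
      by_cases hj : j = 0
      · simp [pvDecGo, pvDigs, hj]
      · have hmod0 : 0 ≤ PySem.Int.mod j n := PySem.Int.mod_nonneg j (by omega)
        have hmod16 : PySem.Int.mod j n < 16 := by
          by_cases h16 : n ≤ 16
          · have := PySem.Int.mod_lt j (show (0:Int) < n by omega); omega
          · have hj15 : j ≤ 15 := hdig.resolve_left h16
            have : PySem.Int.mod j n = j := by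
              rw [PySem.Int.mod_eq_emod_of_pos (by omega), Int.emod_eq_of_lt hj0 (by omega)]
            omega
        have hdivnn : 0 ≤ PySem.Int.floordiv j n := by
          rw [PySem.Int.floordiv_eq_ediv_of_pos (by omega)]
          exact Int.ediv_nonneg hj0 (by omega)
        have hdig' : n ≤ 16 ∨ PySem.Int.floordiv j n ≤ 15 := by
          rcases hdig with h | h
          · exact Or.inl h
          · right
            rw [PySem.Int.floordiv_eq_ediv_of_pos (by omega)]
            have : j / n ≤ j := Int.ediv_le_self n hj0
            omega
        rw [pvDecGo, if_neg hj, ih _ _ hdivnn hdig',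
            pv_strOf_eq _ hmod0 hmod16]
        simp [pvDigs, hj]

theorem pvDec_eq_rep (n : Int) (hn : 2 ≤ n) (j : Int) (hj : 1 ≤ j) (hdig : n ≤ 16 ∨ j ≤ 15) :
    pvDecChange n j = pvRep n j := by
  rw [pvDecChange, pvRep, if_neg (by omega), pvRepGo_eq_digs,
      pvDecGo_eq_digs n hn _ _ _ (by omega) hdig]
  simp

theorem pvRep_ne_nil (n : Int) (j : Int) (hj : 0 ≤ j) :
    pvRep n j ≠ [] := by
  rw [pvRep]
  by_cases hj0 : j = 0
  · simp [hj0]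
  · rw [if_neg hj0, pvRepGo_eq_digs]
    simp only [List.nil_append]
    intro h
    rw [pvDigs, if_neg hj0] at h
    simp at h

theorem pvStream_succ (n : Int) (k : Nat) :
    pvStream n (k + 1) = pvStream n k ++ pvRep n (k : Int) := by
  simp [pvStream, List.range_succ]

theorem pvStream_prefix (n : Int) (a b : Nat) (hab : a ≤ b) :
    ∃ rest, pvStream n b = pvStream n a ++ rest := by
  induction b with
  | zero => exact ⟨[], by simp [show a = 0 by omega]⟩
  | succ b ih =>
      by_cases h : a = b + 1
      · exact ⟨[], by simp [h]⟩
      · obtain ⟨rest, hr⟩ := ih (by omega)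
        exact ⟨rest ++ pvRep n (b : Int), by rw [pvStream_succ, hr, List.append_assoc]⟩

theorem pvStream_len_mono (n : Int) (a b : Nat) (hab : a ≤ b) :
    (pvStream n a).length ≤ (pvStream n b).length := by
  obtain ⟨rest, hr⟩ := pvStream_prefix n a b hab
  simp [hr]

-- reading the stream at position |stream j| + off is reading rep j at off
theorem pvStream_getElem (n : Int) (j k : Nat) (hjk : j < k) (off : Nat)
    (hoff : off < (pvRep n (j : Int)).length) :
    (pvStream n k)[(pvStream n j).length + off]? = (pvRep n (j : Int))[off]? := by
  obtain ⟨rest, hr⟩ := pvStream_prefix n (j + 1) k (by omega)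
  rw [hr, pvStream_succ]
  rw [List.append_assoc, List.getElem?_append_right (by omega)]
  simp only [Nat.add_sub_cancel_left]
  rw [List.getElem?_append_left hoff]

-- the power sum and the hit count behind pvLen, for a base already known to be ≥ 2
def pvSum (n : Int) (k : Int) : Int := (Finset.range 63).sum (fun i => max 0 (k - n ^ i))

def pvCount (n : Int) (k : Int) : Int :=
  (Finset.range 63).sum (fun i => if n ^ i ≤ k then 1 else 0)

theorem pv_one_le_pow (n : Int) (hn : 1 ≤ n) (i : Nat) : 1 ≤ n ^ i := by
  have := pow_pos (show (0:Int) < n by omega) i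
  omega

theorem pvCount_of_nonpos (n : Int) (hn : 2 ≤ n) (k : Int) (hk : k ≤ 0) :
    pvCount n k = 0 := by
  unfold pvCount
  apply Finset.sum_eq_zero
  intro i _
  have := pv_one_le_pow n (by omega) i
  rw [if_neg (by omega)]

theorem pvCount_rec (n : Int) (hn : 2 ≤ n) (k : Int) (hk : 1 ≤ k) (hcap : k < n ^ 62) :
    pvCount n k = 1 + pvCount n (k / n) := by
  unfold pvCount
  rw [Finset.sum_range_succ']
  have h0 : (if n ^ 0 ≤ k then (1:Int) else 0) = 1 := by
    rw [if_pos (by simpa using hk)]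
  have hstep : ∀ i, (if n ^ (i + 1) ≤ k then (1:Int) else 0)
      = (if n ^ i ≤ k / n then 1 else 0) := by
    intro i
    have hiff : n ^ (i + 1) ≤ k ↔ n ^ i ≤ k / n := by
      rw [pow_succ]
      exact (Int.le_ediv_iff_mul_le (by omega)).symm
    by_cases h : n ^ (i + 1) ≤ k
    · rw [if_pos h, if_pos (hiff.mp h)]
    · rw [if_neg h, if_neg (fun h' => h (hiff.mpr h'))]
  have hlast : (if n ^ 62 ≤ k / n then (1:Int) else 0) = 0 := by
    have hdle : k / n ≤ k := Int.ediv_le_self n (by omega)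
    rw [if_neg (by omega)]
  have hext : (Finset.range 63).sum (fun i => if n ^ i ≤ k / n then (1:Int) else 0)
      = (Finset.range 62).sum (fun i => if n ^ i ≤ k / n then (1:Int) else 0) := by
    rw [Finset.sum_range_succ, hlast, add_zero]
  rw [Finset.sum_congr rfl (fun i _ => hstep i), h0, hext]
  ring

theorem pvSum_succ (n : Int) (hn : 2 ≤ n) (k : Int) :
    pvSum n (k + 1) = pvSum n k + pvCount n k := by
  unfold pvSum pvCount
  rw [← Finset.sum_add_distrib]
  apply Finset.sum_congr rfl
  intro i _
  by_cases h : n ^ i ≤ k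
  · rw [if_pos h, max_eq_right (by omega), max_eq_right (by omega)]
    ring
  · rw [if_neg h, max_eq_left (by omega), max_eq_left (by omega)]
    ring

-- the digit loop computes the hit count
theorem pvDigs_count (n : Int) (hn : 2 ≤ n) :
    ∀ (f : Nat) (j : Int), 0 ≤ j → j < n ^ 62 → j ≤ (f : Int) →
    ((pvDigs n f j).length : Int) = pvCount n j := by
  intro f
  induction f with
  | zero =>
      intro j hj0 _ hf
      have : j = 0 := by omega
      subst this
      simp [pvDigs, pvCount_of_nonpos n hn 0 le_rfl]
  | succ f ih =>
      intro j hj0 hcap hf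
      by_cases hj : j = 0
      · subst hj
        simp [pvDigs, pvCount_of_nonpos n hn 0 le_rfl]
      · have hdiv : PySem.Int.floordiv j n = j / n :=
          PySem.Int.floordiv_eq_ediv_of_pos (by omega)
        have hq0 : 0 ≤ j / n := Int.ediv_nonneg hj0 (by omega)
        have hqlt : j / n < j := by
          have hdm := Int.ediv_add_emod j n
          have hr : 0 ≤ j % n := Int.emod_nonneg j (by omega)
          by_cases hq : j / n = 0
          · omega
          · have h1 : 1 ≤ j / n := by omega
            nlinarith
        rw [pvDigs, if_neg hj, List.length_cons, hdiv]
        push_cast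
        rw [ih (j / n) hq0 (by omega) (by omega)]
        rw [pvCount_rec n hn j (by omega) hcap]
        ring

theorem pvRep_length (n : Int) (hn : 2 ≤ n) (j : Int) (hj : 1 ≤ j) (hcap : j < n ^ 62) :
    ((pvRep n j).length : Int) = pvCount n j := by
  rw [pvRep, if_neg (by omega), pvRepGo_eq_digs]
  simp only [List.nil_append, List.length_reverse]
  exact pvDigs_count n hn (j.natAbs + 1) j (by omega) hcap (by omega)

theorem pvStream_one_length (n : Int) : (pvStream n 1).length = 1 := by
  simp [pvStream, pvRep]

theorem pvLen_unfold (n K : Int) (hn : 2 ≤ n) : pvLen n K = 1 + pvSum n K := by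
  unfold pvLen pvSum
  rw [max_eq_left (by omega)]

theorem pvStream_length_eq (n : Int) (hn : 2 ≤ n) :
    ∀ (k : Nat), ((k : Int) + 1) ≤ n ^ 62 →
    ((pvStream n (k + 1)).length : Int) = pvLen n ((k : Int) + 1) := by
  intro k
  induction k with
  | zero =>
      intro _
      have hs : pvSum n 1 = 0 := by
        apply Finset.sum_eq_zero
        intro i _
        have := pv_one_le_pow n (by omega) i
        rw [max_eq_left (by omega)]
      have h1 : ((0:Nat):Int) + 1 = 1 := by norm_num
      rw [h1, pvStream_one_length, pvLen_unfold n _ hn, hs]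
      norm_num
  | succ k ih =>
      intro hcap
      have hc : ((k + 1 : Nat) : Int) = (k : Int) + 1 := by push_cast; ring
      rw [pvStream_succ, List.length_append]
      push_cast
      rw [ih (by push_cast at hcap ⊢; omega)]
      have hrep : ((pvRep n ((k + 1 : Nat) : Int)).length : Int) = pvCount n ((k : Int) + 1) := by
        rw [hc]
        exact pvRep_length n hn _ (by omega) (by push_cast at hcap; omega)
      rw [hc] at hrep
      rw [hrep, pvLen_unfold n _ hn, pvLen_unfold n _ hn]
      have := pvSum_succ n hn ((k : Int) + 1)
      push_cast
      omega

theorem pvLen_of_le_one (n K : Int) (hK : K ≤ 1) : pvLen n K = 1 := by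
  unfold pvLen
  have : (Finset.range 63).sum (fun i => max 0 (K - (max n 2) ^ i)) = 0 := by
    apply Finset.sum_eq_zero
    intro i _
    have := pv_one_le_pow (max n 2) (by omega) i
    rw [max_eq_left (by omega)]
  rw [this]
  ring

theorem pvLen_eq (n K : Int) (hn : 2 ≤ n) (hcap : K ≤ n ^ 62) :
    pvLen n K = ((pvStream n (max K 1).toNat).length : Int) := by
  rcases le_or_lt' K 1 with h | h
  · rw [pvLen_of_le_one n K h]
    have h2 : (max K 1).toNat = 1 := by omega
    rw [h2, pvStream_one_length]
    simp
  · have h2 : (max K 1).toNat = (K - 1).toNat + 1 := by omega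
    have h3 : (((K - 1).toNat : Nat) : Int) + 1 = K := by omega
    rw [h2, pvStream_length_eq n hn ((K - 1).toNat) (by omega), h3]

-- A's `all` string is exactly the truncated stream
theorem pvAll_aux (n : Int) (hn : 2 ≤ n) :
    ∀ (k : Nat), 1 ≤ k → (n ≤ 16 ∨ (k : Int) ≤ 16) →
    (PySem.List.pyRange 1 (k : Int) 1).foldl (fun acc i => acc ++ pvDecChange n i) ['0']
      = pvStream n k := by
  intro k
  induction k with
  | zero => omega
  | succ k ih =>
      intro _ hdig
      by_cases hk : k = 0
      · subst hk
        rw [show (((0:Nat) + 1 : Nat) : Int) = 1 by norm_num,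
            PySem.List.pyRange_one_eq_nil (by omega)]
        simp [pvStream, pvRep, List.range_succ]
      · have hcast : ((k + 1 : Nat) : Int) = (k : Int) + 1 := by push_cast; ring
        have hdig' : n ≤ 16 ∨ (k : Int) ≤ 16 := by
          rcases hdig with h | h
          · exact Or.inl h
          · right; push_cast at h ⊢; omega
        rw [hcast, PySem.List.pyRange_one_succ_right (by omega), List.foldl_append,
            ih (by omega) hdig']
        simp only [List.foldl_cons, List.foldl_nil]
        have hdigk : n ≤ 16 ∨ (k : Int) ≤ 15 := by
          rcases hdig with h | h
          · exact Or.inl h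
          · right; push_cast at h ⊢; omega
        rw [pvDec_eq_rep n hn _ (by exact_mod_cast Nat.one_le_iff_ne_zero.mpr hk) hdigk,
            pvStream_succ]

-- invariant-preserving specification of the while-loop scan
theorem pvAdvance_spec (n : Int) (idx : Int) :
    ∀ (fuel : Nat) (j pos : Int) (cur : List Char), 0 ≤ j →
    pos = ((pvStream n j.toNat).length : Int) → cur = pvRep n j → pos ≤ idx →
    (idx - pos).toNat < fuel →
    ∃ j' pos' cur', pvAdvance n idx fuel (j, pos, cur) = (j', pos', cur') ∧
      0 ≤ j' ∧ pos' = ((pvStream n j'.toNat).length : Int) ∧ cur' = pvRep n j' ∧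
      pos' ≤ idx ∧ idx < pos' + (cur'.length : Int) := by
  intro fuel
  induction fuel with
  | zero => intro j pos cur _ _ _ hle hf; omega
  | succ f ih =>
      intro j pos cur hj0 hpos hcur hle hf
      by_cases hstep : pos + (cur.length : Int) ≤ idx
      · have hne := pvRep_ne_nil n j hj0
        have hlen : 1 ≤ cur.length := by
          rw [hcur]; cases h' : pvRep n j with
          | nil => exact absurd h' hne
          | cons a l => simp
        have hnext : pos + (cur.length : Int) = ((pvStream n (j + 1).toNat).length : Int) := by
          have : (j + 1).toNat = j.toNat + 1 := by omega
          rw [this, pvStream_succ, hpos, hcur]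
          have : ((j.toNat : Int)) = j := by omega
          rw [this]
          simp
        obtain ⟨j', pos', cur', heq, h'⟩ :=
          ih (j + 1) (pos + (cur.length : Int)) (pvRep n (j + 1)) (by omega) hnext rfl hstep
            (by omega)
        exact ⟨j', pos', cur', by rw [pvAdvance, if_pos hstep]; exact heq, h'⟩
      · exact ⟨j, pos, cur, by rw [pvAdvance, if_neg hstep], hj0, hpos, hcur, hle, by omega⟩

-- both answer loops agree, with the running pointer invariant on B's side
theorem pvLoop_aux (n t m p : Int) (K : Nat)
    (hmt : 0 ≤ m ∨ t ≤ 1)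
    (h0 : 0 ≤ p - 1) (h1 : 0 ≤ p - 1 + m * (t - 1))
    (h2 : p - 1 < ((pvStream n K).length : Int))
    (h3 : p - 1 + m * (t - 1) < ((pvStream n K).length : Int)) :
    ∀ (w : Nat) (a : Int) (out : List Char) (j pos : Int) (cur : List Char),
      a + w = t → 0 ≤ a → 0 ≤ j →
      pos = ((pvStream n j.toNat).length : Int) → cur = pvRep n j →
      (pos ≤ p - 1 + m * a ∨ t ≤ a) →
      (PySem.List.pyRange a t 1).foldl
          (fun ans i => ans ++ (match PySem.List.pyGet? (pvStream n K) (p + m * i - 1) with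
              | some c => [c] | none => [])) out
        = ((PySem.List.pyRange a t 1).foldl (pvStepB n m p) (out, j, pos, cur)).1 := by
  intro w
  induction w with
  | zero =>
      intro a out j pos cur ha _ _ _ _ _
      rw [PySem.List.pyRange_one_eq_nil (by omega)]
      rfl
  | succ w ih =>
      intro a out j pos cur ha ha0 hj0 hpos hcur hple'
      have hat : a < t := by omega
      have hple : pos ≤ p - 1 + m * a := by
        rcases hple' with h | h
        · exact h
        · omega
      rw [PySem.List.pyRange_one_cons hat]
      simp only [List.foldl_cons]
      set idx := p - 1 + m * a with hidx
      -- idx lies between the two endpoint indices, hence inside the stream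
      have hbounds : 0 ≤ idx ∧ idx < ((pvStream n K).length : Int) := by
        rcases le_or_lt' 0 m with hm | hm
        · constructor
          · have : 0 ≤ m * a := mul_nonneg hm ha0
            omega
          · have : m * a ≤ m * (t - 1) := by nlinarith
            omega
        · have ht1 : t ≤ 1 := by rcases hmt with h | h <;> omega
          have ha' : a = 0 := by omega
          subst ha'
          omega
      obtain ⟨hidx0, hidxL⟩ := hbounds
      -- the while loop lands on the right (number, offset) pair
      obtain ⟨j', pos', cur', heq, hj0', hpos', hcur', hle', hlt'⟩ :=
        pvAdvance_spec n idx ((idx - pos).toNat + 1) j pos cur hj0 hpos hcur hple (by omega)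
      have hstep : pvStepB n m p (out, j, pos, cur) a
          = (out ++ (match PySem.List.pyGet? cur' (idx - pos') with
              | some c => [c] | none => []), j', pos', cur') := by
        simp only [pvStepB, ← hidx, heq]
      have hpos'0 : 0 ≤ pos' := by
        rw [hpos']; positivity
      -- the current number lies inside the first K numbers
      have hjk : j'.toNat < K := by
        by_contra hcon
        have := pvStream_len_mono n K j'.toNat (by omega)
        omega
      have hoff : (idx - pos').toNat < (pvRep n j').length := by
        rw [← hcur']; omega
      have hcast : ((j'.toNat : Int)) = j' := by omega
      have hget := pvStream_getElem n j'.toNat K hjk (idx - pos').toNat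
        (by rw [hcast]; exact hoff)
      rw [hcast] at hget
      have hsum : (pvStream n j'.toNat).length + (idx - pos').toNat = idx.toNat := by omega
      rw [hsum] at hget
      have hA : PySem.List.pyGet? (pvStream n K) (p + m * a - 1)
          = (pvStream n K)[idx.toNat]? := by
        have : p + m * a - 1 = idx := by omega
        rw [this, PySem.List.pyGet?_of_nonneg _ hidx0]
      have hB : PySem.List.pyGet? cur' (idx - pos') = cur'[(idx - pos').toNat]? := by
        rw [PySem.List.pyGet?_of_nonneg _ (by omega)]
      have hpick : PySem.List.pyGet? (pvStream n K) (p + m * a - 1)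
          = PySem.List.pyGet? cur' (idx - pos') := by
        rw [hA, hB, hget, hcur']
      rw [hstep, hpick]
      -- recurse with the preserved invariant
      refine ih (a + 1) _ j' pos' cur' (by omega) (by omega) hj0' hpos' hcur' ?_
      rcases le_or_lt' 0 m with hm | hm
      · left
        have : m * (a + 1) = m * a + m := by ring
        omega
      · right
        rcases hmt with h | h <;> omega

theorem pv_trivial_case (n t m p : Int) (ht : t ≤ 0) :
    solution n t m p = solution_alt n t m p := by
  have h1 : PySem.List.pyRange 0 t 1 = [] := PySem.List.pyRange_one_eq_nil (by omega)
  simp [solution, solution_alt, h1]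

theorem pv_main_case (n t m p : Int) (ht : 1 ≤ t)
    (hcap62 : t * m ≤ 4611686018427387904)
    (hA : 2 ≤ n ∨ t * m ≤ 1) (hB : n ≤ 16 ∨ t * m ≤ 16)
    (hp : 1 ≤ p) (hge : 0 ≤ p - 1 + m * (t - 1))
    (hlt1 : p - 1 < pvLen n (t * m)) (hlt2 : p - 1 + m * (t - 1) < pvLen n (t * m)) :
    solution n t m p = solution_alt n t m p := by
  set K : Nat := (max (t * m) 1).toNat with hK
  -- `all` is the truncated stream
  have hall : (PySem.List.pyRange 1 (t * m) 1).foldl (fun acc i => acc ++ pvDecChange n i) ['0']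
      = pvStream n K := by
    rcases le_or_lt' (t * m) 1 with h | h
    · have hK1 : K = 1 := by omega
      rw [PySem.List.pyRange_one_eq_nil h, hK1]
      simp [pvStream, pvRep, List.range_succ]
      
    · have hn2 : 2 ≤ n := by rcases hA with h' | h' <;> omega
      have hK2 : K = (t * m).toNat := by omega
      have hc : (((t * m).toNat : Nat) : Int) = t * m := by omega
      have hdig : n ≤ 16 ∨ (((t * m).toNat : Nat) : Int) ≤ 16 := by
        rcases hB with h' | h'
        · exact Or.inl h'
        · right; omega
      have hfold := pvAll_aux n hn2 (t * m).toNat (by omega) hdig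
      rw [hc] at hfold
      rw [hK2, hfold]
  -- pvLen is the stream length
  have hL : pvLen n (t * m) = ((pvStream n K).length : Int) := by
    rcases le_or_lt' (t * m) 1 with h | h
    · have hK1 : K = 1 := by omega
      rw [pvLen_of_le_one n _ h, hK1, pvStream_one_length]
      simp
    · have hn2 : 2 ≤ n := by rcases hA with h' | h' <;> omega
      have hcap : t * m ≤ n ^ 62 := by
        refine le_trans hcap62 ?_
        calc (4611686018427387904 : Int) = 2 ^ 62 := by norm_num
          _ ≤ n ^ 62 := pow_le_pow_left₀ (by norm_num) (by omega) 62
      rw [pvLen_eq n (t * m) hn2 hcap]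
  -- with t ≥ 2 inside Pre_, m cannot be negative
  have hmt : 0 ≤ m ∨ t ≤ 1 := by
    by_contra hcon
    push_neg at hcon
    obtain ⟨hm, ht2⟩ := hcon
    have htm : t * m ≤ 1 := by nlinarith
    rw [pvLen_of_le_one n _ htm] at hlt1 hlt2
    have : m * (t - 1) ≤ -1 := by nlinarith
    omega
  rw [hL] at hlt1 hlt2
  unfold solution solution_alt
  rw [hall]
  exact congrArg String.mk
    (pvLoop_aux n t m p K hmt (by omega) hge hlt1 hlt2 t.toNat 0 [] 0 0 (pvRep n 0)
      (by omega) (by omega) (by omega) (by simp [pvStream]) rfl (by left; simp; omega))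

-- ===== VERDICT (by name: the statement is the Claim_ definition above) =====
theorem solution_spec : Claim_equal_solution := by
  intro n t m p hdom hpre
  unfold Spec_solution
  unfold Dom_solution pvDomInt at hdom
  simp only [Bool.and_eq_true, decide_eq_true_eq] at hdom
  obtain ⟨⟨⟨-, ⟨htl, htu⟩⟩, ⟨hml, hmu⟩⟩, -⟩ := hdom
  have hcap62 : t * m ≤ 4611686018427387904 := by
    have h1 : (0:Int) ≤ (2147483648 - t) * (2147483648 + m) := mul_nonneg (by omega) (by omega)
    have h2 : (0:Int) ≤ (2147483648 + t) * (2147483648 - m) := mul_nonneg (by omega) (by omega)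
    nlinarith
  obtain ⟨hA, hB, hC⟩ := hpre
  rcases hC with ht | ⟨hp, hge, hlt1, hlt2⟩
  · exact pv_trivial_case n t m p ht
  · by_cases ht : 1 ≤ t
    · exact pv_main_case n t m p ht hcap62 hA hB hp hge hlt1 hlt2
    · exact pv_trivial_case n t m p (by omega)
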